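-- pv_equiv track=rewrite | github.com/SeokLii/Algorithm | Other/옹알이(1)(PR).py | solution
-- ===== SOURCE A (Python) =====
-- from itertools import permutations
--
-- def solution(babbling):
--     kind = []
--     for i in range(1, 5):
--         kind.extend([''.join(j) for j in list(permutations(["aya", "ye", "woo", "ma"], i))])
--
--     answer = 0
--     for i in babbling:
--         if i in kind:
--             answer += 1
--     return answer
-- ===== SOURCE B (Python) =====
-- def solution(babbling):
--     sounds = ["aya", "ye", "woo", "ma"]
--
--     def parse(s, used):
--         if s == "":
--             return True
--         for d in used:
--             if s.startswith(d) and parse(s[len(d):], [u for u in used if u != d]):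
--                 return True
--         return False
--
--     return sum(1 for w in babbling if w != "" and parse(w, sounds))
-- ===== Notes on version B (the rewrite author's own statement) =====
-- stated objective: alternative
-- what changed: B drops A's precomputed list of all 64 permutation-concatenations and instead decides each word directly with a recursive prefix parser that consumes one unused sound at a time (backtracking over the four sounds), counting the non-empty words the parser accepts.
import Mathlib
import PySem

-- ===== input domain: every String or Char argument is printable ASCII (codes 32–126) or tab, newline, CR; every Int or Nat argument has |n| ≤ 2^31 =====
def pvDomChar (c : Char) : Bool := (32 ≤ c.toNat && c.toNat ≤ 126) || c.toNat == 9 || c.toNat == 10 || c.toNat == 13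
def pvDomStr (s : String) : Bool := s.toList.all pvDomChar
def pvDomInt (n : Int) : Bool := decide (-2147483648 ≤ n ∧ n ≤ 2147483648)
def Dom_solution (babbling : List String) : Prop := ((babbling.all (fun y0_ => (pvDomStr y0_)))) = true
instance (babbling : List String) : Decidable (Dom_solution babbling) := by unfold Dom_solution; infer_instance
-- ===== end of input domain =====

-- B replaces A's precomputed set of all 64 permutation-concatenations with a direct
-- recursive prefix parser per word (alternative decomposition; same observable result).

-- ===== PORT A =====
-- kind = all ''.join(j) for j in permutations(["aya","ye","woo","ma"], i), i = 1..4;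
-- then count the words of `babbling` that occur in kind.
def solution (babbling : List String) : Int :=
  let kind : List String :=
    (PySem.List.pyRange 1 5 1).foldl
      (fun acc i =>
        acc ++ (PySem.List.permutations ["aya", "ye", "woo", "ma"] i.toNat).map
          (fun j => PySem.Str.join "" j)) []
  babbling.foldl (fun answer i => if kind.contains i then answer + 1 else answer) 0

-- ===== PORT B =====
def pvSounds : List String := ["aya", "ye", "woo", "ma"]

-- parse s used: True iff s is a concatenation of distinct sounds drawn from `used`
-- (the empty s succeeds); the for-loop with early True return is `any`.
def parse (s : String) (used : List String) : Bool :=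
  if s = "" then true
  else
    used.attach.any (fun d =>
      PySem.Str.startswith s d.1 &&
        parse (PySem.Str.slice s (some (PySem.Str.len d.1)) none)
          (used.filter (fun u => !(u == d.1))))
termination_by used.length
decreasing_by
  simp only [List.length_unattach]
  rw [← List.length_attach (l := used)]
  refine List.length_filter_lt_length_iff_exists.mpr ⟨d, List.mem_attach _ _, ?_⟩
  simp

def solution_alt (babbling : List String) : Int :=
  ((babbling.filter (fun w => !(w == "") && parse w pvSounds)).length : Int)

-- ===== PRECONDITION & SPEC =====
def Spec_solution (babbling : List String) (out : Int) : Prop := out = solution_alt babbling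
instance (babbling : List String) (out : Int) : Decidable (Spec_solution babbling out) := by unfold Spec_solution; infer_instance

-- ===== CLAIM (what is proved, stated in full; the proofs are below) =====
def Claim_equal_solution : Prop := ∀ (babbling : List String), Dom_solution babbling → Spec_solution babbling (solution babbling)

-- ===== LEMMAS AND PROOFS =====

-- A's kind list, named for the proofs (definitionally the `let` inside `solution`).
def pvKindL : List String :=
  (PySem.List.pyRange 1 5 1).foldl
    (fun acc i =>
      acc ++ (PySem.List.permutations ["aya", "ye", "woo", "ma"] i.toNat).map
        (fun j => PySem.Str.join "" j)) []

-- The language of `parse` at the char level, with fuel ≥ used.length (structural, so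
-- the kernel can evaluate it in `decide`).
def allJoinsF : Nat → List (List Char) → List (List Char)
  | 0, _ => [[]]
  | n + 1, used =>
    [] :: used.flatMap (fun d =>
      (allJoinsF n (used.filter (fun u => !(u == d)))).map (fun t => d ++ t))

theorem strBeq_toList (u d : String) : (u == d) = (u.toList == d.toList) := by
  by_cases h : u = d
  · simp [h]
  · have h2 : ¬ u.toList = d.toList := fun hh => h (String.toList_inj.mp hh)
    simp [h, h2]

theorem toList_eq_nil_iff (s : String) : s.toList = [] ↔ s = "" := by
  constructor
  · intro h; exact String.toList_inj.mp (by simpa using h)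
  · intro h; simp [h]

theorem filter_map_toList (used : List String) (d : String) :
    (used.filter (fun u => !(u == d))).map String.toList
      = (List.map String.toList used).filter (fun u => !(u == d.toList)) := by
  conv_rhs => rw [List.filter_map]
  congr 1
  apply List.filter_congr
  intro u _
  simp [Function.comp, strBeq_toList]

theorem parse_iff (fuel : Nat) : ∀ (used : List String) (s : String),
    used.length ≤ fuel →
    (parse s used = true ↔ s.toList ∈ allJoinsF fuel (used.map String.toList)) := by
  induction fuel with
  | zero =>
    intro used s hf
    have hu : used = [] := List.length_eq_zero_iff.mp (Nat.le_zero.mp hf)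
    subst hu
    rw [parse.eq_def]
    by_cases hs : s = ""
    · simp [hs, allJoinsF]
    · simp [hs, allJoinsF]
  | succ n ih =>
    intro used s hf
    rw [parse.eq_def]
    by_cases hs : s = ""
    · simp [hs, allJoinsF]
    · have hsl : ¬ s.toList = [] := fun h => hs ((toList_eq_nil_iff s).mp h)
      simp only [hs, if_false, allJoinsF, List.mem_cons, List.mem_flatMap,
        List.any_eq_true, List.mem_attach, true_and, Bool.and_eq_true, List.mem_map]
      constructor
      · rintro ⟨⟨d, hd⟩, hsw, hp⟩
        have hpre : d.toList <+: s.toList := by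
          rw [PySem.Str.startswith_eq] at hsw
          exact (PySem.Chars.startswith_iff _ _).mp hsw
        obtain ⟨t, ht⟩ := hpre
        have hflt : (used.filter (fun u => !(u == d))).length ≤ n := by
          have : (used.filter (fun u => !(u == d))).length < used.length :=
            List.length_filter_lt_length_iff_exists.mpr ⟨d, hd, by simp⟩
          omega
        have hslice : (PySem.Str.slice s (some (PySem.Str.len d)) none).toList
            = s.toList.drop d.toList.length := by
          rw [PySem.Str.toList_slice, PySem.Chars.slice_eq_listSlice, PySem.Str.len_eq,
            PySem.List.slice_from_natCast]
        have hdrop : s.toList.drop d.toList.length = t := by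
          rw [← ht]; exact List.drop_left
        refine Or.inr ⟨d.toList, ⟨d, hd, rfl⟩, s.toList.drop d.toList.length, ?_, ?_⟩
        · have hmem := (ih _ _ hflt).mp hp
          rw [hslice] at hmem
          rw [← filter_map_toList]
          exact hmem
        · rw [hdrop]; exact ht
      · rintro (h | ⟨dc, ⟨d, hd, rfl⟩, t, ht, hst⟩)
        · exact absurd h hsl
        · refine ⟨⟨d, hd⟩, ?_, ?_⟩
          · rw [PySem.Str.startswith_eq]
            exact (PySem.Chars.startswith_iff _ _).mpr ⟨t, hst⟩
          · have hflt : (used.filter (fun u => !(u == d))).length ≤ n := by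
              have : (used.filter (fun u => !(u == d))).length < used.length :=
                List.length_filter_lt_length_iff_exists.mpr ⟨d, hd, by simp⟩
              omega
            apply (ih _ _ hflt).mpr
            have hslice : (PySem.Str.slice s (some (PySem.Str.len d)) none).toList
                = s.toList.drop d.toList.length := by
              rw [PySem.Str.toList_slice, PySem.Chars.slice_eq_listSlice, PySem.Str.len_eq,
                PySem.List.slice_from_natCast]
            rw [hslice, filter_map_toList, ← hst, List.drop_left]
            exact ht

-- A's concrete candidate set equals (as a set) the nonempty words of parse's language:
-- both sides are closed lists, checked by `decide`.
theorem kind_mem (cs : List Char) :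
    cs ∈ pvKindL.map String.toList ↔
      (cs ≠ [] ∧ cs ∈ allJoinsF 4 (pvSounds.map String.toList)) := by
  constructor
  · intro h
    have H1 : ∀ x ∈ pvKindL.map String.toList,
        x ≠ [] ∧ x ∈ allJoinsF 4 (pvSounds.map String.toList) := by decide
    exact H1 cs h
  · rintro ⟨h1, h2⟩
    have H2 : ∀ x ∈ allJoinsF 4 (pvSounds.map String.toList),
        x = [] ∨ x ∈ pvKindL.map String.toList := by decide
    rcases H2 cs h2 with h | h
    · exact absurd h h1
    · exact h

theorem word_eq (s : String) :
    pvKindL.contains s = (!(s == "") && parse s pvSounds) := by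
  have hiff : pvKindL.contains s = true ↔ (!(s == "") && parse s pvSounds) = true := by
    rw [List.contains_iff_mem]
    rw [← List.mem_map_of_injective (f := String.toList) (fun a b h => String.toList_inj.mp h)]
    rw [kind_mem]
    rw [← parse_iff 4 pvSounds s (by simp [pvSounds])]
    simp only [Bool.and_eq_true, Bool.not_eq_true', beq_eq_false_iff_ne, ne_eq]
    constructor
    · rintro ⟨h1, h2⟩
      exact ⟨fun hh => h1 (by simp [hh]), h2⟩
    · rintro ⟨h1, h2⟩
      exact ⟨fun hh => h1 ((toList_eq_nil_iff s).mp hh), h2⟩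
  cases hc : pvKindL.contains s
  · cases hb : (!(s == "") && parse s pvSounds)
    · rfl
    · exact hc.symm.trans (hiff.mpr hb)
  · exact (hiff.mp hc).symm

-- ===== VERDICT (by name: the statement is the Claim_ definition above) =====
theorem solution_spec : Claim_equal_solution := by
  unfold Claim_equal_solution Spec_solution
  intro babbling _
  show (babbling.foldl (fun answer i => if pvKindL.contains i then answer + 1 else answer) 0 : Int)
      = solution_alt babbling
  rw [PySem.List.foldl_if_add_one]
  unfold solution_alt
  rw [← List.countP_eq_length_filter]
  rw [List.countP_congr (fun x _ => by rw [word_eq x])]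
  simp
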